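-- pv_equiv track=rewrite | github.com/pohaoc2/he-feature-visualizer | server.py | dzi_level_info
-- ===== SOURCE A (Python) =====
-- import argparse, io, json, math
--
-- TILE_SIZE = 254
--
-- def dzi_level_info(img_w, img_h, tile_size=TILE_SIZE):
--     max_dim   = max(img_w, img_h)
--     max_level = math.ceil(math.log2(max_dim)) if max_dim > 0 else 0
--     levels = {}
--     for lv in range(max_level + 1):
--         scale = 2 ** (max_level - lv)
--         w = max(1, math.ceil(img_w / scale))
--         h = max(1, math.ceil(img_h / scale))
--         levels[lv] = {"w": w, "h": h,
--                       "cols": math.ceil(w / tile_size),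
--                       "rows": math.ceil(h / tile_size)}
--     return levels, max_level
-- ===== SOURCE B (Python) =====
-- TILE_SIZE = 254
--
-- def _cdiv(a, b):
--     # exact integer ceiling division, any sign of b (b != 0)
--     return -((-a) // b)
--
-- def dzi_level_info(img_w, img_h, tile_size=TILE_SIZE):
--     max_dim = max(img_w, img_h)
--     max_level = (max_dim - 1).bit_length() if max_dim > 0 else 0
--     # build the pyramid top-down: finest level first, halving (with the
--     # >=1 clamp) to get each coarser level from the previous one
--     w, h = max(1, img_w), max(1, img_h)
--     order = []
--     for lv in range(max_level, -1, -1):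
--         order.append((lv, {"w": w, "h": h,
--                            "cols": _cdiv(w, tile_size),
--                            "rows": _cdiv(h, tile_size)}))
--         w, h = max(1, _cdiv(w, 2)), max(1, _cdiv(h, 2))
--     return dict(reversed(order)), max_level
-- ===== Notes on version B (the rewrite author's own statement) =====
-- stated objective: alternative
-- what changed: B replaces A's per-level closed-form ceil(dim/2^(max_level-lv)) computed independently for each level by the canonical top-down DZI construction: start at the finest level and derive each coarser level from the previous one by clamped ceiling-halving, building the dict back-to-front; float math (log2, ceil of float division) is replaced by exact integer bit_length and ceiling division.
import Mathlib
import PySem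

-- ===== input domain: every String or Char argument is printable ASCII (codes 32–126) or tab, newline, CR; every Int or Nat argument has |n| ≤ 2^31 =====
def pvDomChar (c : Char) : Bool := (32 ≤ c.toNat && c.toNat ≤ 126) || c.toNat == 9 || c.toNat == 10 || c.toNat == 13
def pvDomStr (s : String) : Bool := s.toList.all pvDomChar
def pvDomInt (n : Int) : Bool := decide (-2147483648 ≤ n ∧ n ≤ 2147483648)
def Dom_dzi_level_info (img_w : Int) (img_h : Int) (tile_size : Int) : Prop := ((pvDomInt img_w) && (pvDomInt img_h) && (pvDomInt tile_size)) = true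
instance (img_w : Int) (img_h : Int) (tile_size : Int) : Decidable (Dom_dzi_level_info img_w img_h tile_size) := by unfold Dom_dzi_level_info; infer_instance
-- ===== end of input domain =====

-- B builds the pyramid top-down by clamped ceiling-halving (the canonical DZI recurrence,
-- pure integer arithmetic) instead of A's independent closed-form ceil(dim/2^k) per level.


-- ===== PORT A =====
-- math.ceil(a / b): exact integer ceiling division (exact on the domain: b a nonzero
-- integer, |a|,|b| ≤ 2^31, where the float division either is exact or is farther than
-- one ulp from every integer)
def pvCdiv (a b : Int) : Int := -(PySem.Int.floordiv (-a) b)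

def dzi_level_info (img_w : Int) (img_h : Int) (tile_size : Int) : (List (Int × List (String × Int))) × Int :=
  let max_dim := max img_w img_h
  -- math.ceil(math.log2 max_dim): exact for 0 < max_dim ≤ 2^31 as bit_length(max_dim - 1)
  let max_level : Int := if max_dim > 0 then (PySem.Int.bitLength (max_dim - 1) : Int) else 0
  let levels := (PySem.List.pyRange 0 (max_level + 1) 1).foldl
    (fun acc lv =>
      let scale : Int := 2 ^ (max_level - lv).toNat   -- max_level - lv ≥ 0 on the range
      let w := max 1 (pvCdiv img_w scale)
      let h := max 1 (pvCdiv img_h scale)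
      acc ++ [(lv, [("w", w), ("h", h), ("cols", pvCdiv w tile_size), ("rows", pvCdiv h tile_size)])])
    []
  (levels, max_level)

-- ===== PORT B =====
-- the loop 'for lv in range(max_level, -1, -1): append entry; halve w,h' of Source B,
-- as structural recursion on the remaining level count (lv = k at step k+1)
def pvAltLoop (tile_size : Int) : Nat → Int → Int → List (Int × List (String × Int))
  | 0, _, _ => []
  | k + 1, w, h =>
      ((k : Int), [("w", w), ("h", h), ("cols", pvCdiv w tile_size), ("rows", pvCdiv h tile_size)])
        :: pvAltLoop tile_size k (max 1 (pvCdiv w 2)) (max 1 (pvCdiv h 2))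

def dzi_level_info_alt (img_w : Int) (img_h : Int) (tile_size : Int) : (List (Int × List (String × Int))) × Int :=
  let max_dim := max img_w img_h
  -- (max_dim - 1).bit_length()
  let max_level : Int := if max_dim > 0 then (PySem.Int.bitLength (max_dim - 1) : Int) else 0
  let order := pvAltLoop tile_size (max_level + 1).toNat (max 1 img_w) (max 1 img_h)
  (order.reverse, max_level)

-- ===== PRECONDITION & SPEC =====
-- Pre_ excludes exactly tile_size = 0, on which A raises ZeroDivisionError (B raises too).
def Pre_dzi_level_info (img_w : Int) (img_h : Int) (tile_size : Int) : Prop := tile_size ≠ 0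
instance (img_w : Int) (img_h : Int) (tile_size : Int) : Decidable (Pre_dzi_level_info img_w img_h tile_size) := by unfold Pre_dzi_level_info; infer_instance
def pvWitness_dzi_level_info : Int × Int × Int := (1024, 768, 254)

def Spec_dzi_level_info (img_w : Int) (img_h : Int) (tile_size : Int) (out : (List (Int × List (String × Int))) × Int) : Prop := out = dzi_level_info_alt img_w img_h tile_size
instance (img_w : Int) (img_h : Int) (tile_size : Int) (out : (List (Int × List (String × Int))) × Int) : Decidable (Spec_dzi_level_info img_w img_h tile_size out) := by unfold Spec_dzi_level_info; infer_instance

-- ===== CLAIM (what is proved, stated in full; the proofs are below) =====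
def Claim_equal_dzi_level_info : Prop := ∀ (img_w : Int) (img_h : Int) (tile_size : Int), Dom_dzi_level_info img_w img_h tile_size → Pre_dzi_level_info img_w img_h tile_size → Spec_dzi_level_info img_w img_h tile_size (dzi_level_info img_w img_h tile_size)

-- ===== LEMMAS AND PROOFS =====

-- the level-lv entry, exponent e = number of halvings from the finest level
def pvE (t a b : Int) (e : Nat) (lv : Int) : Int × List (String × Int) :=
  let w := max 1 (pvCdiv a (2 ^ e))
  let h := max 1 (pvCdiv b (2 ^ e))
  (lv, [("w", w), ("h", h), ("cols", pvCdiv w t), ("rows", pvCdiv h t)])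

theorem pvCdiv_one (a : Int) : pvCdiv a 1 = a := by
  simp [pvCdiv]

theorem pvCdiv_cdiv (a : Int) (m : Nat) : pvCdiv (pvCdiv a (2 ^ m)) 2 = pvCdiv a (2 ^ (m + 1)) := by
  have h1 : (0:Int) < 2 ^ m := by positivity
  have h2 : (0:Int) < 2 := by norm_num
  have h3 : (0:Int) < 2 ^ (m + 1) := by positivity
  simp only [pvCdiv, neg_neg,
    PySem.Int.floordiv_eq_ediv_of_pos h1, PySem.Int.floordiv_eq_ediv_of_pos h2,
    PySem.Int.floordiv_eq_ediv_of_pos h3]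
  rw [Int.ediv_ediv_of_nonneg (le_of_lt h1)]
  norm_num [pow_succ]

theorem pvCdiv_nonpos {u : Int} (hu : u ≤ 0) : pvCdiv u 2 ≤ 0 := by
  have : (0:Int) ≤ PySem.Int.floordiv (-u) 2 := by
    rw [PySem.Int.floordiv_eq_ediv_of_pos (by norm_num : (0:Int) < 2)]
    exact Int.ediv_nonneg (by omega) (by norm_num)
  simp [pvCdiv]; omega

theorem pvHalve_clamp (a : Int) (m : Nat) :
    max 1 (pvCdiv (max 1 (pvCdiv a (2 ^ m))) 2) = max 1 (pvCdiv a (2 ^ (m + 1))) := by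
  rcases le_or_gt 1 (pvCdiv a (2 ^ m)) with h | h
  · rw [max_eq_right h, pvCdiv_cdiv]
  · have hu : pvCdiv a (2 ^ m) ≤ 0 := by omega
    have h1 : max (1:Int) (pvCdiv a (2 ^ m)) = 1 := by omega
    have hc1 : pvCdiv (1:Int) 2 = 1 := by decide
    have h2 : pvCdiv a (2 ^ (m + 1)) ≤ 0 := by
      rw [← pvCdiv_cdiv]; exact pvCdiv_nonpos hu
    rw [h1, hc1]; omega

theorem pvAltLoop_eq (t a b : Int) :
    ∀ (k m : Nat),
      pvAltLoop t k (max 1 (pvCdiv a (2 ^ m))) (max 1 (pvCdiv b (2 ^ m)))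
        = (List.range k).reverse.map (fun j => pvE t a b (m + (k - 1 - j)) (j : Int)) := by
  intro k
  induction k with
  | zero => intro m; simp [pvAltLoop]
  | succ k ih =>
    intro m
    rw [pvAltLoop, pvHalve_clamp a m, pvHalve_clamp b m, ih (m + 1)]
    rw [List.range_succ, List.reverse_append, List.reverse_singleton]
    simp only [List.singleton_append, List.map_cons]
    congr 1
    · simp [pvE]
    · apply List.map_congr_left
      intro j hj
      have hjk : j < k := by simpa using hj
      have : m + 1 + (k - 1 - j) = m + (k + 1 - 1 - j) := by omega
      rw [this]

theorem pvFoldl_append {α β : Type} (f : α → β) :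
    ∀ (l : List α) (acc : List β),
      l.foldl (fun acc x => acc ++ [f x]) acc = acc ++ l.map f := by
  intro l
  induction l with
  | nil => intro acc; simp
  | cons x xs ih => intro acc; simp [List.foldl_cons, ih]

theorem dzi_level_info_spec : Claim_equal_dzi_level_info := by
  intro img_w img_h tile_size _hDom _hPre
  unfold Spec_dzi_level_info dzi_level_info dzi_level_info_alt
  simp only
  set L : Int := if max img_w img_h > 0 then (PySem.Int.bitLength (max img_w img_h - 1) : Int) else 0 with hL
  have hL0 : 0 ≤ L := by
    rw [hL]; split <;> positivity
  refine Prod.ext ?_ rfl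
  simp only
  -- rewrite B's initial clamps through pvCdiv _ 2^0
  have hw : max 1 img_w = max 1 (pvCdiv img_w (2 ^ 0)) := by rw [pow_zero, pvCdiv_one]
  have hh : max 1 img_h = max 1 (pvCdiv img_h (2 ^ 0)) := by rw [pow_zero, pvCdiv_one]
  rw [hw, hh, pvAltLoop_eq, List.map_reverse, List.reverse_reverse]
  rw [PySem.List.pyRange_one, pvFoldl_append, List.nil_append, List.map_map]
  simp only [sub_zero, Function.comp_def, zero_add]
  apply List.map_congr_left
  intro k hk
  have hkn : k < (L + 1).toNat := List.mem_range.mp hk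
  simp only [pvE]
  have hexp : (L - (k : Int)).toNat = (L + 1).toNat - 1 - k := by omega
  rw [hexp]
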